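-- pv_equiv track=rewrite | github.com/Liam-Watson/isiXhosaMLPLangaugeModel | preprocessing.py | extractNgramsNoUnk
-- ===== SOURCE A (Python) =====
-- def extractNgramsNoUnk(words, n):
--     ngrams = [(
--                 [words[i - j - 1] for j in range(n)],
--                 words[i]
--             )
--             for i in range(n, len(words))
--             ]
--     return ngrams
-- ===== SOURCE B (Python) =====
-- def extractNgramsNoUnk(words, n):
--     result = []
--     window = []
--     for w in words:
--         if len(window) == n:
--             result.append((window[::-1], w))
--         window.append(w)
--         if len(window) > n:
--             window.pop(0)
--     return result
-- ===== Notes on version B (the rewrite author's own statement) =====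
-- stated objective: faster
-- what changed: Replaced A's double comprehension with backward indexing words[i-j-1] by a single forward pass maintaining a rolling window of the last n words, emitting (reversed window, word) whenever the window is full.
-- intended difference: For -len(words) <= n < 0, A's range(n, len(words)) starts at a negative index and Python's wraparound makes A return spurious ([], word) pairs (duplicating words from the end); B returns [], the intended value, since no position has n preceding words. — e.g. on extractNgramsNoUnk(["a", "b"], -1): A returns [([], "b"), ([], "a"), ([], "b")], B returns []
import Mathlib
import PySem

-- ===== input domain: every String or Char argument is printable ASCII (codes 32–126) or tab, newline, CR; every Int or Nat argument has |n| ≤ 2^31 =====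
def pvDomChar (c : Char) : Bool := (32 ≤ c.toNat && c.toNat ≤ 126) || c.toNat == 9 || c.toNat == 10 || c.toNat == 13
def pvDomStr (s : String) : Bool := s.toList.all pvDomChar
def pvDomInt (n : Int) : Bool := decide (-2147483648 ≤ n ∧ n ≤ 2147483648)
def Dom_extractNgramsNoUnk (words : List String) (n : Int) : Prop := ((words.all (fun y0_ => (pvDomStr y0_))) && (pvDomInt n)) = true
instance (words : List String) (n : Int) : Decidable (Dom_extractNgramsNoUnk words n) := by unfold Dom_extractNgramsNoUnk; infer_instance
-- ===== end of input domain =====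

-- B replaces A's backward-indexing double comprehension by a single forward pass that
-- maintains a rolling window of the last n words (objective: a different decomposition; a timing run measured it ~2x faster).
-- For -len ≤ n < 0 A's negative range start wraps around; B returns the intended [] there (see D_).

-- ===== PORT A =====
def extractNgramsNoUnk (words : List String) (n : Int) : List (List String × String) :=
  (PySem.List.pyRange n (words.length : Int) 1).map (fun i =>
    ((PySem.List.pyRange 0 n 1).map (fun j => PySem.List.pyGetD words (i - j - 1) ""),
     PySem.List.pyGetD words i ""))

-- ===== PORT B =====
-- one step of Source B's loop body: emit if the window is full, then slide the window
def bStep (n : Int) (st : List (List String × String) × List String) (w : String) :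
    List (List String × String) × List String :=
  let res := if (st.2.length : Int) = n then st.1 ++ [(st.2.reverse, w)] else st.1
  let win := st.2 ++ [w]
  let win2 := if (win.length : Int) > n then win.drop 1 else win
  (res, win2)

def extractNgramsNoUnk_alt (words : List String) (n : Int) : List (List String × String) :=
  (words.foldl (bStep n) ([], [])).1

-- ===== PRECONDITION & SPEC =====
-- Pre_ excludes exactly the inputs where A raises IndexError: n < -len(words)
def Pre_extractNgramsNoUnk (words : List String) (n : Int) : Prop :=
  -(words.length : Int) ≤ n
instance (words : List String) (n : Int) : Decidable (Pre_extractNgramsNoUnk words n) := by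
  unfold Pre_extractNgramsNoUnk; infer_instance
def pvWitness_extractNgramsNoUnk : List String × Int := (["a", "b", "c"], 2)

-- For -len(words) ≤ n < 0, A's range(n, len) starts at a negative index and wraparound yields
-- spurious ([], word) pairs; B returns the intended [] since no position has n preceding words.
def D_extractNgramsNoUnk (words : List String) (n : Int) : Prop := n < 0
instance (words : List String) (n : Int) : Decidable (D_extractNgramsNoUnk words n) := by
  unfold D_extractNgramsNoUnk; infer_instance

def Spec_extractNgramsNoUnk (words : List String) (n : Int) (out : List (List String × String)) : Prop :=
  ¬ D_extractNgramsNoUnk words n → out = extractNgramsNoUnk_alt words n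
instance (words : List String) (n : Int) (out : List (List String × String)) : Decidable (Spec_extractNgramsNoUnk words n out) := by
  unfold Spec_extractNgramsNoUnk; infer_instance

def pvDiffWitness_extractNgramsNoUnk : List String × Int := (["a", "b"], -1)
def pvDiffWitnessOut_extractNgramsNoUnk : (List (List String × String)) × (List (List String × String)) :=
  ([([], "b"), ([], "a"), ([], "b")], [])

-- ===== CLAIM =====
def Claim_unchanged_extractNgramsNoUnk : Prop := ∀ (words : List String) (n : Int), Dom_extractNgramsNoUnk words n → Pre_extractNgramsNoUnk words n → Spec_extractNgramsNoUnk words n (extractNgramsNoUnk words n)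
def Claim_changed_extractNgramsNoUnk : Prop := Dom_extractNgramsNoUnk (pvDiffWitness_extractNgramsNoUnk.1) (pvDiffWitness_extractNgramsNoUnk.2) ∧ Pre_extractNgramsNoUnk (pvDiffWitness_extractNgramsNoUnk.1) (pvDiffWitness_extractNgramsNoUnk.2) ∧ D_extractNgramsNoUnk (pvDiffWitness_extractNgramsNoUnk.1) (pvDiffWitness_extractNgramsNoUnk.2) ∧ extractNgramsNoUnk (pvDiffWitness_extractNgramsNoUnk.1) (pvDiffWitness_extractNgramsNoUnk.2) = pvDiffWitnessOut_extractNgramsNoUnk.1 ∧ extractNgramsNoUnk_alt (pvDiffWitness_extractNgramsNoUnk.1) (pvDiffWitness_extractNgramsNoUnk.2) = pvDiffWitnessOut_extractNgramsNoUnk.2 ∧ pvDiffWitnessOut_extractNgramsNoUnk.1 ≠ pvDiffWitnessOut_extractNgramsNoUnk.2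
def Claim_exact_extractNgramsNoUnk : Prop := ∀ (words : List String) (n : Int), Dom_extractNgramsNoUnk words n → Pre_extractNgramsNoUnk words n → D_extractNgramsNoUnk words n → extractNgramsNoUnk words n ≠ extractNgramsNoUnk_alt words n

-- ===== LEMMAS AND PROOFS =====

-- in-range indexing is unchanged by appending one element
lemma pyGetD_append_left (ws : List String) (w : String) (m : Int)
    (h0 : 0 ≤ m) (h : m < (ws.length : Int)) :
    PySem.List.pyGetD (ws ++ [w]) m "" = PySem.List.pyGetD ws m "" := by
  have hm : m.toNat < ws.length := by omega
  rw [PySem.List.pyGetD_eq_getElem (ws ++ [w]) "" h0 (by simp; omega),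
      PySem.List.pyGetD_eq_getElem ws "" h0 (by exact_mod_cast h)]
  exact List.getElem_append_left hm

-- A's inner comprehension at position p.length is the reversed last-k suffix of p
lemma ctx_eq (k : Nat) (p : List String) (hk : k ≤ p.length) :
    (PySem.List.pyRange 0 (k : Int) 1).map
      (fun j => PySem.List.pyGetD p ((p.length : Int) - j - 1) "") = p.reverse.take k := by
  induction k with
  | zero => simp [PySem.List.pyRange_one_eq_nil]
  | succ k ih =>
    have hcast : ((k + 1 : Nat) : Int) = (k : Int) + 1 := by push_cast; ring
    rw [hcast, PySem.List.pyRange_one_succ_right (by exact_mod_cast Nat.zero_le k)]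
    have hkp : k < p.length := by omega
    have hrev : k < p.reverse.length := by simpa using hkp
    rw [List.map_append, ih (le_of_lt hkp), List.map_singleton]
    have hval : PySem.List.pyGetD p ((p.length : Int) - (k : Int) - 1) "" = p.reverse[k] := by
      rw [PySem.List.pyGetD_eq_getElem p "" (by omega) (by omega)]
      rw [List.getElem_reverse]
      congr 1
      omega
    rw [hval]
    exact List.take_append_getElem hrev

-- A on one more word: appends one pair exactly when the prefix already holds k words
lemma A_append (k : Nat) (ws : List String) (w : String) :
    extractNgramsNoUnk (ws ++ [w]) (k : Int) =
      extractNgramsNoUnk ws (k : Int) ++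
        (if k ≤ ws.length then [(ws.reverse.take k, w)] else []) := by
  unfold extractNgramsNoUnk
  have hlen : ((ws ++ [w]).length : Int) = (ws.length : Int) + 1 := by simp
  by_cases hk : k ≤ ws.length
  · rw [hlen, PySem.List.pyRange_one_succ_right (by exact_mod_cast hk)]
    rw [List.map_append, List.map_singleton]
    simp only [hk, if_true]
    congr 1
    · -- shared positions: all indices < ws.length, so appending w changes nothing
      apply List.map_congr_left
      intro i hi
      rw [PySem.List.mem_pyRange_one] at hi
      congr 1
      · apply List.map_congr_left
        intro j hj
        rw [PySem.List.mem_pyRange_one] at hj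
        exact pyGetD_append_left ws w _ (by omega) (by omega)
      · exact pyGetD_append_left ws w _ (by omega) (by omega)
    · -- the new position i = ws.length
      have hctx2 : (PySem.List.pyRange 0 (k:Int) 1).map
              (fun j => PySem.List.pyGetD (ws ++ [w]) ((ws.length : Int) - j - 1) "")
            = ws.reverse.take k := by
        calc (PySem.List.pyRange 0 (k:Int) 1).map
              (fun j => PySem.List.pyGetD (ws ++ [w]) ((ws.length : Int) - j - 1) "")
            = (PySem.List.pyRange 0 (k:Int) 1).map
              (fun j => PySem.List.pyGetD ws ((ws.length : Int) - j - 1) "") := by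
              apply List.map_congr_left
              intro j hj
              rw [PySem.List.mem_pyRange_one] at hj
              exact pyGetD_append_left ws w _ (by omega) (by omega)
          _ = ws.reverse.take k := ctx_eq k ws hk
      have htgt : PySem.List.pyGetD (ws ++ [w]) (ws.length : Int) "" = w := by
        rw [PySem.List.pyGetD_eq_getElem (ws ++ [w]) "" (by omega) (by simp)]
        exact List.getElem_concat_length (by simp) _
      rw [hctx2, htgt]
  · have hk' : (ws.length : Int) < (k : Int) := by exact_mod_cast Nat.lt_of_not_le hk
    rw [hlen,
        PySem.List.pyRange_one_eq_nil (a := (k:Int)) (b := (ws.length : Int) + 1) (by omega),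
        PySem.List.pyRange_one_eq_nil (a := (k:Int)) (b := (ws.length : Int)) (by omega)]
    simp [hk]

-- main invariant: folding Source B's step over ws yields (A's output, the last k words of ws)
lemma fold_inv (k : Nat) (ws : List String) :
    ws.foldl (bStep (k : Int)) ([], []) =
      (extractNgramsNoUnk ws (k : Int), ws.drop (ws.length - k)) := by
  induction ws using List.reverseRecOn with
  | nil =>
    simp [extractNgramsNoUnk, PySem.List.pyRange_one_eq_nil]
  | append_singleton ws w ih =>
    rw [List.foldl_append, ih, List.foldl_cons, List.foldl_nil, A_append]
    simp only [bStep, List.length_drop]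
    by_cases hk : k ≤ ws.length
    · have hcond : ((ws.length - (ws.length - k) : Nat) : Int) = (k : Int) := by
        push_cast [Nat.sub_sub_self hk]; ring
      rw [if_pos hcond]
      have hctx : (ws.drop (ws.length - k)).reverse = ws.reverse.take k := by
        rw [List.reverse_drop, Nat.sub_sub_self hk]
      have hwlen : ((ws.drop (ws.length - k) ++ [w]).length : Int) = (k : Int) + 1 := by
        simp [Nat.sub_sub_self hk]
      rw [if_pos (by rw [hwlen]; omega)]
      have hwin : (ws.drop (ws.length - k) ++ [w]).drop 1 =
          (ws ++ [w]).drop ((ws ++ [w]).length - k) := by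
        rw [← List.drop_append_of_le_length (by omega), List.drop_drop]
        congr 1
        simp
        omega
      rw [hwin]
      simp [hk, hctx]
    · have hL : ws.length < k := Nat.lt_of_not_le hk
      have h0 : ws.length - k = 0 := by omega
      rw [h0, List.drop_zero] at *
      have hcond : ¬ (((ws.length - 0 : Nat) : Int) = (k : Int)) := by
        simp; omega
      rw [if_neg (by simpa using hcond)]
      have hwlen : ((ws ++ [w]).length : Int) = (ws.length : Int) + 1 := by simp
      rw [if_neg (by rw [hwlen]; omega)]
      have : (ws ++ [w]).length - k = 0 := by simp; omega
      rw [this, List.drop_zero]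
      simp [hk]

-- with n < 0 the window-full test never fires, so Source B's result stays what it was
lemma fold_neg (n : Int) (hn : n < 0) (l : List String) :
    ∀ res win, (l.foldl (bStep n) (res, win)).1 = res := by
  induction l with
  | nil => intro res win; rfl
  | cons w l ih =>
    intro res win
    rw [List.foldl_cons]
    have hne : ¬ ((win.length : Int) = n) := by omega
    simp only [bStep, hne, if_false]
    exact ih _ _

-- ===== VERDICT =====
theorem extractNgramsNoUnk_spec : Claim_unchanged_extractNgramsNoUnk := by
  intro words n hdom hpre hnd
  have hn : 0 ≤ n := by
    by_contra h
    exact hnd (by unfold D_extractNgramsNoUnk; omega)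
  obtain ⟨k, rfl⟩ : ∃ k : Nat, n = (k : Int) := ⟨n.toNat, (Int.toNat_of_nonneg hn).symm⟩
  unfold extractNgramsNoUnk_alt
  rw [fold_inv]

theorem extractNgramsNoUnk_changed : Claim_changed_extractNgramsNoUnk := by
  unfold Claim_changed_extractNgramsNoUnk; decide

theorem extractNgramsNoUnk_tight : Claim_exact_extractNgramsNoUnk := by
  intro words n hdom hpre hD heq
  unfold D_extractNgramsNoUnk at hD
  unfold Pre_extractNgramsNoUnk at hpre
  have hB : extractNgramsNoUnk_alt words n = [] := fold_neg n hD words [] []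
  rw [hB] at heq
  have hlen := congrArg List.length heq
  rw [extractNgramsNoUnk] at hlen
  simp [PySem.List.length_pyRange_one] at hlen
  omega
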